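-- pv_equiv track=rewrite | github.com/RescuedBuffalo/valorant-esport-simulator | app/simulation/match_engine.py | _get_agent_role
-- ===== SOURCE A (Python) =====
-- def _get_agent_role(agent: str) -> str:
--     """
--     Returns the role of a given agent.
--
--     Args:
--         agent: Agent name
--
--     Returns:
--         Role of the agent
--     """
--     roles = {
--         'Duelist': ['Jett', 'Phoenix', 'Raze', 'Reyna', 'Yoru', 'Neon', 'ISO'],
--         'Controller': ['Brimstone', 'Viper', 'Omen', 'Astra', 'Harbor', 'Clove'],
--         'Sentinel': ['Killjoy', 'Cypher', 'Sage', 'Chamber', 'Deadlock'],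
--         'Initiator': ['Sova', 'Breach', 'Skye', 'KAY/O', 'Fade', 'Gekko']
--     }
--
--     for role, agents in roles.items():
--         if agent in agents:
--             return role
--
--     # Default if agent not found
--     return 'Duelist'
-- ===== SOURCE B (Python) =====
-- # Sorted (agent, role) table searched by hand-written binary search; default 'Duelist'.
-- _PAIRS = [
--     ('Astra', 'Controller'), ('Breach', 'Initiator'), ('Brimstone', 'Controller'),
--     ('Chamber', 'Sentinel'), ('Clove', 'Controller'), ('Cypher', 'Sentinel'),
--     ('Deadlock', 'Sentinel'), ('Fade', 'Initiator'), ('Gekko', 'Initiator'),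
--     ('Harbor', 'Controller'), ('ISO', 'Duelist'), ('Jett', 'Duelist'),
--     ('KAY/O', 'Initiator'), ('Killjoy', 'Sentinel'), ('Neon', 'Duelist'),
--     ('Omen', 'Controller'), ('Phoenix', 'Duelist'), ('Raze', 'Duelist'),
--     ('Reyna', 'Duelist'), ('Sage', 'Sentinel'), ('Skye', 'Initiator'),
--     ('Sova', 'Initiator'), ('Viper', 'Controller'), ('Yoru', 'Duelist'),
-- ]
--
--
-- def _get_agent_role(agent: str) -> str:
--     """Returns the role of a given agent (default 'Duelist' if unknown)."""
--     lo, hi = 0, len(_PAIRS)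
--     while lo < hi:
--         mid = (lo + hi) // 2
--         if _PAIRS[mid][0] < agent:
--             lo = mid + 1
--         else:
--             hi = mid
--     if lo < len(_PAIRS) and _PAIRS[lo][0] == agent:
--         return _PAIRS[lo][1]
--     return 'Duelist'
-- ===== Notes on version B (the rewrite author's own statement) =====
-- stated objective: alternative
-- what changed: B stores the agents in one sorted (agent, role) array and locates the agent by a hand-written binary search (bisect-left loop) followed by an equality check with default, instead of A's linear scan over the four role buckets with a per-list membership test.
import Mathlib
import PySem

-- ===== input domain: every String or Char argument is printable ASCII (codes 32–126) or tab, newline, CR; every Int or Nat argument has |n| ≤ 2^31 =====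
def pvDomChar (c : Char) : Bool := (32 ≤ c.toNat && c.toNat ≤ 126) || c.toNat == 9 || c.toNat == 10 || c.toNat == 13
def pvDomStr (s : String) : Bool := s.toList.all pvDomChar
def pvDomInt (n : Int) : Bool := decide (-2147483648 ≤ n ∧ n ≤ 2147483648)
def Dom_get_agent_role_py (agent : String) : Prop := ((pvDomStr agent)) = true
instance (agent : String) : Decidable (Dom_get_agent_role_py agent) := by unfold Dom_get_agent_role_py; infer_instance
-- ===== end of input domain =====

-- B replaces A's linear scan over role buckets by a sorted (agent, role) table with a binary search (alternative algorithm).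

-- ===== PORT A =====
-- the roles dict literal of A (insertion order)
def rolesTable : List (String × List String) :=
  [("Duelist", ["Jett", "Phoenix", "Raze", "Reyna", "Yoru", "Neon", "ISO"]),
   ("Controller", ["Brimstone", "Viper", "Omen", "Astra", "Harbor", "Clove"]),
   ("Sentinel", ["Killjoy", "Cypher", "Sage", "Chamber", "Deadlock"]),
   ("Initiator", ["Sova", "Breach", "Skye", "KAY/O", "Fade", "Gekko"])]

-- the 'for role, agents in roles.items(): if agent in agents: return role' loop
def findRoleA (agent : String) : List (String × List String) → String
  | [] => "Duelist"
  | (role, agents) :: rest =>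
      if agents.contains agent then role else findRoleA agent rest

def get_agent_role_py (agent : String) : String := findRoleA agent rolesTable

-- ===== PORT B =====
-- Source B's _PAIRS literal: the 24 (agent, role) pairs sorted by agent name
def sortedPairs : List (String × String) :=
  [("Astra", "Controller"), ("Breach", "Initiator"), ("Brimstone", "Controller"),
   ("Chamber", "Sentinel"), ("Clove", "Controller"), ("Cypher", "Sentinel"),
   ("Deadlock", "Sentinel"), ("Fade", "Initiator"), ("Gekko", "Initiator"),
   ("Harbor", "Controller"), ("ISO", "Duelist"), ("Jett", "Duelist"),
   ("KAY/O", "Initiator"), ("Killjoy", "Sentinel"), ("Neon", "Duelist"),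
   ("Omen", "Controller"), ("Phoenix", "Duelist"), ("Raze", "Duelist"),
   ("Reyna", "Duelist"), ("Sage", "Sentinel"), ("Skye", "Initiator"),
   ("Sova", "Initiator"), ("Viper", "Controller"), ("Yoru", "Duelist")]

-- Python's '<' on strings: lexicographic comparison of code points (exact on all strings)
def strLtB : List Char → List Char → Bool
  | [], [] => false
  | [], _ :: _ => true
  | _ :: _, [] => false
  | a :: as, b :: bs =>
      if a.toNat < b.toNat then true
      else if b.toNat < a.toNat then false
      else strLtB as bs

-- the 'while lo < hi: mid = (lo+hi)//2; …' bisect-left loop, with fuel ≥ hi - lo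
-- (each iteration shrinks hi - lo by at least one, so fuel = initial hi - lo is exact)
def bsearchGo (agent : String) : Nat → Nat → Nat → Nat
  | 0, lo, _ => lo
  | fuel + 1, lo, hi =>
      if lo < hi then
        let mid := (lo + hi) / 2
        if strLtB (sortedPairs.getD mid ("", "")).1.toList agent.toList then
          bsearchGo agent fuel (mid + 1) hi
        else
          bsearchGo agent fuel lo mid
      else lo

-- 'if lo < len(_PAIRS) and _PAIRS[lo][0] == agent: return _PAIRS[lo][1]; return "Duelist"'
def get_agent_role_py_alt (agent : String) : String :=
  let n := sortedPairs.length
  let lo := bsearchGo agent n 0 n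
  match sortedPairs[lo]? with
  | some p => if p.1 == agent then p.2 else "Duelist"
  | none => "Duelist"

-- ===== PRECONDITION & SPEC =====
def Spec_get_agent_role_py (agent : String) (out : String) : Prop := out = get_agent_role_py_alt agent
instance (agent : String) (out : String) : Decidable (Spec_get_agent_role_py agent out) := by unfold Spec_get_agent_role_py; infer_instance

-- ===== CLAIM (what is proved, stated in full; the proofs are below) =====
def Claim_equal_get_agent_role_py : Prop := ∀ (agent : String), Dom_get_agent_role_py agent → Spec_get_agent_role_py agent (get_agent_role_py agent)

-- ===== LEMMAS AND PROOFS =====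

-- A returns the default when the agent is in none of the buckets
theorem findRoleA_default (agent : String) :
    ∀ table : List (String × List String),
      (∀ p ∈ table, agent ∉ p.2) → findRoleA agent table = "Duelist" := by
  intro table
  induction table with
  | nil => intro _; rfl
  | cons hd tl ih =>
      intro h
      have hhd : agent ∉ hd.2 := h hd (List.mem_cons_self ..)
      cases hd with
      | mk role agents =>
          simp [findRoleA, hhd]
          exact ih fun p hp => h p (List.mem_cons_of_mem _ hp)

-- every bucket member occurs as a key of the sorted table (finite check)
theorem buckets_sub_keys :
    ∀ p ∈ rolesTable, ∀ a ∈ p.2, a ∈ sortedPairs.map Prod.fst := by decide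

-- B returns the default when the agent is not a key of the sorted table
theorem alt_default (agent : String) (h : agent ∉ sortedPairs.map Prod.fst) :
    get_agent_role_py_alt agent = "Duelist" := by
  unfold get_agent_role_py_alt
  cases hg : sortedPairs[bsearchGo agent sortedPairs.length 0 sortedPairs.length]? with
  | none => simp only; rw [hg]
  | some p =>
      have hp : p ∈ sortedPairs := List.mem_of_getElem? hg
      have hkey : p.1 ∈ sortedPairs.map Prod.fst := List.mem_map_of_mem hp
      have hne : p.1 ≠ agent := fun he => h (he ▸ hkey)
      simp only
      rw [hg]
      simp [hne]

-- the 24 known agents, checked once by evaluation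
theorem hall : ((sortedPairs.map Prod.fst).all
    fun a => get_agent_role_py a == get_agent_role_py_alt a) = true := by decide

theorem ports_agree (agent : String) :
    get_agent_role_py agent = get_agent_role_py_alt agent := by
  by_cases h : agent ∈ sortedPairs.map Prod.fst
  · exact eq_of_beq (List.all_eq_true.mp hall agent h)
  · rw [alt_default agent h]
    exact findRoleA_default agent rolesTable
      (fun p hp ha => h (buckets_sub_keys p hp agent ha))

-- ===== VERDICT (by name: the statement is the Claim_ definition above) =====
theorem get_agent_role_py_spec : Claim_equal_get_agent_role_py := by
  intro agent _
  unfold Spec_get_agent_role_py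
  exact ports_agree agent
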